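-- pv_equiv track=rewrite | github.com/natTP/2110101-comp-prog | 09_MoreDC/0934-FillNum.py | pattern5
-- ===== SOURCE A (Python) =====
-- def pattern5(N):
--     n = 1
--     z = 0
--     table = []
--     for i in range(N):
--         row = []
--         m = n
--         inc = N
--         for j in range(z):
--             row.append(0)
--         for j in range(z,N):
--             row.append(m)
--             m += inc
--             inc -= 1
--         z += 1
--         table.append(row)
--         n += 1
--     return table
-- ===== SOURCE B (Python) =====
-- def pattern5(N):
--     # Precompute the diagonal offsets once, then build each row by shifting them.
--     diag = []
--     last = 0
--     inc = N
--     for _ in range(N):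
--         diag.append(last)
--         last += inc
--         inc -= 1
--     return [[0] * i + [(i + 1) + x for x in diag[:N - i]] for i in range(N)]
-- ===== Notes on version B (the rewrite author's own statement) =====
-- stated objective: alternative
-- what changed: B precomputes the diagonal offset sequence once in a single pass and builds each row as leading zeros plus a shifted prefix of that table, instead of A re-deriving the decreasing-increment chain inside every row.
import Mathlib
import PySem

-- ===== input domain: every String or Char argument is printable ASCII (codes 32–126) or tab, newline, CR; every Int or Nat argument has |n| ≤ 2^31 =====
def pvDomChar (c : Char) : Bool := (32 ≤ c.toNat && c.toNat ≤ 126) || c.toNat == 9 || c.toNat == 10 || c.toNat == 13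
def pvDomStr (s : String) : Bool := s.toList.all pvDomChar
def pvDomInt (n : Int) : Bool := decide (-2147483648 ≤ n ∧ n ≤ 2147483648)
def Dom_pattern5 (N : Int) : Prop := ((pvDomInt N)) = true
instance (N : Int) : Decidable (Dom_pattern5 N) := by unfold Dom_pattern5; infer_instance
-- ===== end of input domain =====

-- B builds the diagonal offset table once and reuses it (shifted) for every row; A recomputes
-- the increment chain per row. Same output, same asymptotic cost; 'alternative' objective.

-- ===== PORT A =====
def pattern5 (N : Int) : List (List Int) :=
  ((PySem.List.pyRange 0 N 1).foldl
    (fun (st : Int × Int × List (List Int)) _i =>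
      let n := st.1
      let z := st.2.1
      let table := st.2.2
      -- row = []; for j in range(z): row.append(0)
      let row0 := (PySem.List.pyRange 0 z 1).foldl (fun r _j => r ++ [(0 : Int)]) []
      -- m = n; inc = N; for j in range(z, N): row.append(m); m += inc; inc -= 1
      let fin := (PySem.List.pyRange z N 1).foldl
        (fun (s : List Int × Int × Int) _j => (s.1 ++ [s.2.1], s.2.1 + s.2.2, s.2.2 - 1))
        (row0, n, N)
      (n + 1, z + 1, table ++ [fin.1]))
    (1, 0, [])).2.2

-- ===== PORT B =====
def pattern5_alt (N : Int) : List (List Int) :=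
  -- diag = []; last = 0; inc = N; for _ in range(N): diag.append(last); last += inc; inc -= 1
  let diag := ((PySem.List.pyRange 0 N 1).foldl
    (fun (s : List Int × Int × Int) _ => (s.1 ++ [s.2.1], s.2.1 + s.2.2, s.2.2 - 1))
    ([], 0, N)).1
  -- [[0]*i + [(i+1)+x for x in diag[:N-i]] for i in range(N)]
  (PySem.List.pyRange 0 N 1).map (fun i =>
    List.replicate i.toNat (0 : Int) ++
      (PySem.List.slice diag none (some (N - i))).map (fun x => (i + 1) + x))

-- ===== PRECONDITION & SPEC =====
def Spec_pattern5 (N : Int) (out : List (List Int)) : Prop := out = pattern5_alt N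
instance (N : Int) (out : List (List Int)) : Decidable (Spec_pattern5 N out) := by unfold Spec_pattern5; infer_instance

-- ===== CLAIM (what is proved, stated in full; the proofs are below) =====
def Claim_equal_pattern5 : Prop := ∀ (N : Int), Dom_pattern5 N → Spec_pattern5 N (pattern5 N)

-- ===== LEMMAS AND PROOFS =====

/-- The value chain m, m+inc, m+inc+(inc-1), … of length k. -/
def pvChain (m inc : Int) : Nat → List Int
  | 0 => []
  | Nat.succ k => m :: pvChain (m + inc) (inc - 1) k

/-- Row z of the table: z zeros followed by the chain starting at z+1 with increment N. -/
def pvRow (N z : Int) : List Int :=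
  List.replicate z.toNat 0 ++ pvChain (z + 1) N (N - z).toNat

lemma pvChain_loop (k : Nat) : ∀ (a b : Int), (b - a).toNat = k →
    ∀ (row : List Int) (m inc : Int), ∃ m',
    (PySem.List.pyRange a b 1).foldl
      (fun (s : List Int × Int × Int) _ => (s.1 ++ [s.2.1], s.2.1 + s.2.2, s.2.2 - 1))
      (row, m, inc)
    = (row ++ pvChain m inc k, m', inc - k) := by
  induction k with
  | zero =>
    intro a b hk row m inc
    rw [PySem.List.pyRange_one_eq_nil (by omega)]
    exact ⟨m, by simp [pvChain]⟩
  | succ k ih =>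
    intro a b hk row m inc
    rw [PySem.List.pyRange_one_cons (by omega)]
    obtain ⟨m', hm'⟩ := ih (a + 1) b (by omega) (row ++ [m]) (m + inc) (inc - 1)
    refine ⟨m', ?_⟩
    simp only [List.foldl_cons, hm', pvChain, List.append_assoc, List.singleton_append]
    refine congrArg _ (congrArg _ ?_)
    push_cast; ring

lemma pvZeros_loop (z : Int) :
    (PySem.List.pyRange 0 z 1).foldl (fun r (_ : Int) => r ++ [(0 : Int)]) []
    = List.replicate z.toNat 0 := by
  rw [PySem.List.foldl_append_singleton_eq_map]
  simp [List.map_const', PySem.List.length_pyRange_one]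

lemma pattern5_outer (k : Nat) : ∀ (N a : Int), (N - a).toNat = k →
    ∀ (table : List (List Int)), ∃ n' z',
    ((PySem.List.pyRange a N 1).foldl
      (fun (st : Int × Int × List (List Int)) _i =>
        let n := st.1
        let z := st.2.1
        let tbl := st.2.2
        let row0 := (PySem.List.pyRange 0 z 1).foldl (fun r _j => r ++ [(0 : Int)]) []
        let fin := (PySem.List.pyRange z N 1).foldl
          (fun (s : List Int × Int × Int) _j => (s.1 ++ [s.2.1], s.2.1 + s.2.2, s.2.2 - 1))
          (row0, n, N)
        (n + 1, z + 1, tbl ++ [fin.1]))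
      (a + 1, a, table))
    = (n', z', table ++ (PySem.List.pyRange a N 1).map (pvRow N)) := by
  induction k with
  | zero =>
    intro N a hk table
    rw [PySem.List.pyRange_one_eq_nil (by omega)]
    exact ⟨a + 1, a, by simp⟩
  | succ k ih =>
    intro N a hk table
    rw [PySem.List.pyRange_one_cons (by omega)]
    obtain ⟨m', hm'⟩ := pvChain_loop (N - a).toNat a N rfl
      (List.replicate a.toNat 0) (a + 1) N
    obtain ⟨n', z', hz⟩ := ih N (a + 1) (by omega) (table ++ [pvRow N a])
    refine ⟨n', z', ?_⟩
    simp only [List.foldl_cons]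
    rw [show (a + 1 + 1, a + 1,
        table ++ [pvRow N a]) = ((a+1)+1, a+1, table ++ [pvRow N a]) from rfl] at hz
    simpa [pvZeros_loop, hm', pvRow, List.append_assoc] using hz

lemma pvChain_take (n : Nat) : ∀ (k : Nat) (m inc : Int),
    (pvChain m inc n).take k = pvChain m inc (min k n) := by
  induction n with
  | zero => intro k m inc; simp [pvChain]
  | succ n ih =>
    intro k m inc
    cases k with
    | zero => simp [pvChain]
    | succ k => simp [pvChain, ih, Nat.succ_min_succ]

lemma pvChain_shift (k : Nat) : ∀ (c m inc : Int),
    (pvChain m inc k).map (fun x => c + x) = pvChain (c + m) inc k := by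
  induction k with
  | zero => intro c m inc; simp [pvChain]
  | succ k ih =>
    intro c m inc
    simp only [pvChain, List.map_cons, ih]
    rw [show c + (m + inc) = c + m + inc by ring]

lemma pattern5_eq (N : Int) :
    pattern5 N = (PySem.List.pyRange 0 N 1).map (pvRow N) := by
  unfold pattern5
  obtain ⟨n', z', h⟩ := pattern5_outer N.toNat N 0 (by omega) []
  rw [show ((1 : Int), (0 : Int), ([] : List (List Int))) = (0 + 1, 0, []) from rfl, h]
  simp

lemma pattern5_alt_eq (N : Int) :
    pattern5_alt N = (PySem.List.pyRange 0 N 1).map (pvRow N) := by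
  unfold pattern5_alt
  obtain ⟨m', hd⟩ := pvChain_loop N.toNat 0 N (by omega) [] 0 N
  simp only [hd, List.nil_append]
  refine List.map_congr_left (fun i hi => ?_)
  have hmem := (PySem.List.mem_pyRange_one).1 hi
  rw [PySem.List.slice_to _ (by omega), pvChain_take, pvChain_shift]
  have : min (N - i).toNat N.toNat = (N - i).toNat := by omega
  rw [this, pvRow, add_zero]

-- ===== VERDICT (by name: the statement is the Claim_ definition above) =====
theorem pattern5_spec : Claim_equal_pattern5 := by
  intro N _
  unfold Spec_pattern5
  rw [pattern5_eq, pattern5_alt_eq]
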